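-- pv_equiv track=rewrite | github.com/t3m3d/krypton | bootstrap/sanitize_ir.py | needs_sanitize
-- ===== SOURCE A (Python) =====
-- ESCAPE_TO_CHARCODE = {"n": "10", "t": "9", "r": "13"}
--
-- def needs_sanitize(content):
--     i = 0
--     while i < len(content):
--         if content[i] == "\\" and i + 1 < len(content):
--             if content[i + 1] in ESCAPE_TO_CHARCODE:
--                 return True
--             i += 2
--             continue
--         i += 1
--     return False
-- ===== SOURCE B (Python) =====
-- ESCAPE_TO_CHARCODE = {"n": "10", "t": "9", "r": "13"}
--
-- def needs_sanitize(content):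
--     # Split once on the backslash; every piece after the first follows a backslash.
--     # A piece whose first char is an escape letter means sanitization is needed;
--     # an empty piece means that backslash escaped the *next* backslash, so the
--     # following piece is skipped (its leading backslash was consumed).
--     skip = False
--     for part in content.split("\\")[1:]:
--         if skip:
--             skip = False
--         elif part == "":
--             skip = True
--         elif part[0] in ESCAPE_TO_CHARCODE:
--             return True
--     return False
-- ===== Notes on version B (the rewrite author's own statement) =====
-- stated objective: faster
-- what changed: Replaces A's character-by-character index scan with manual i+=2 skipping by a single str.split('\') followed by a scan over the resulting pieces: each piece after the first starts right after a backslash, an empty piece marks an escaped backslash and makes the next piece be skipped.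
import Mathlib
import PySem

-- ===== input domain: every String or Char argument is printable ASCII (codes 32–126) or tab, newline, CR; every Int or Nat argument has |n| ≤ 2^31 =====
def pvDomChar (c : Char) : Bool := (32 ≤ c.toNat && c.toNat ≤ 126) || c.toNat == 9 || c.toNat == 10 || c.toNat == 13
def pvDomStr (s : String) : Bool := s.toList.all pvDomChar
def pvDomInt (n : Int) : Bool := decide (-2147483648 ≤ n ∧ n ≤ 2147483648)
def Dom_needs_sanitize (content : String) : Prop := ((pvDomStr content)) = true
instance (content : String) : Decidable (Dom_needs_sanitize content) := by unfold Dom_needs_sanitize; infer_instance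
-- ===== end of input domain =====

-- B replaces A's character-by-character index scan (manual i += 2 skip) by one split on
-- the backslash followed by a scan of the resulting pieces (the split runs in C; the
-- timing run measured B faster); objective: faster by a constant factor.

-- ===== PORT A =====
-- A's while loop over index i; content[i] via the character list, guarded by i < len.
def needs_sanitize_go (cs : List Char) (i : Nat) : Bool :=
  if _h : i < cs.length then
    if cs[i]! = '\\' ∧ i + 1 < cs.length then
      if cs[i+1]! = 'n' ∨ cs[i+1]! = 't' ∨ cs[i+1]! = 'r' then true
      else needs_sanitize_go cs (i + 2)
    else needs_sanitize_go cs (i + 1)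
  else false
termination_by cs.length - i

def needs_sanitize (content : String) : Bool := needs_sanitize_go content.toList 0

-- ===== PORT B =====
-- Source B's loop over content.split("\\")[1:] with the skip flag.
-- Python's str.split with the single-char separator "\\" is exactly List.splitOn '\\'
-- on the character list (empty pieces kept, "".split -> [""] ↔ splitOn [] = [[]]).
def needs_sanitize_alt_go : Bool → List (List Char) → Bool
  | _, [] => false
  | skip, p :: rest =>
    if skip then needs_sanitize_alt_go false rest
    else if p = [] then needs_sanitize_alt_go true rest
    else if p.head! = 'n' ∨ p.head! = 't' ∨ p.head! = 'r' then true
    else needs_sanitize_alt_go false rest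

def needs_sanitize_alt (content : String) : Bool :=
  needs_sanitize_alt_go false ((content.toList.splitOn '\\').drop 1)

-- ===== PRECONDITION & SPEC =====
def Spec_needs_sanitize (content : String) (out : Bool) : Prop := out = needs_sanitize_alt content
instance (content : String) (out : Bool) : Decidable (Spec_needs_sanitize content out) := by unfold Spec_needs_sanitize; infer_instance

-- ===== CLAIM (what is proved, stated in full; the proofs are below) =====
def Claim_equal_needs_sanitize : Prop := ∀ (content : String), Dom_needs_sanitize content → Spec_needs_sanitize content (needs_sanitize content)

-- ===== LEMMAS AND PROOFS =====

-- Proof-side intermediate: the obvious two-state machine over the characters.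
def pvSM : Bool → List Char → Bool
  | _, [] => false
  | true, c :: rest =>
    if c = 'n' ∨ c = 't' ∨ c = 'r' then true else pvSM false rest
  | false, c :: rest => pvSM (c = '\\') rest

theorem pvSM_false_cons (c : Char) (r : List Char) : pvSM false (c :: r) = pvSM (c = '\\') r := rfl

theorem pvSM_true_cons (c : Char) (r : List Char) :
    pvSM true (c :: r) = if c = 'n' ∨ c = 't' ∨ c = 'r' then true else pvSM false r := rfl

-- A's scan from index i equals the state machine on the suffix from i.
theorem go_eq_sm (n : Nat) : ∀ (cs : List Char) (i : Nat), cs.length - i ≤ n →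
    needs_sanitize_go cs i = pvSM false (cs.drop i) := by
  induction n with
  | zero =>
    intro cs i h
    have hle : cs.length ≤ i := by omega
    rw [needs_sanitize_go, List.drop_eq_nil_of_le hle]
    simp [pvSM, Nat.not_lt.mpr hle]
  | succ n ih =>
    intro cs i h
    rw [needs_sanitize_go]
    by_cases hi : i < cs.length
    · have hdrop : cs.drop i = cs[i] :: cs.drop (i+1) := List.drop_eq_getElem_cons hi
      simp only [hi, dif_pos, getElem!_pos cs i hi]
      by_cases hb : cs[i] = '\\' ∧ i + 1 < cs.length
      · obtain ⟨hc, hi1⟩ := hb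
        have hdrop1 : cs.drop (i+1) = cs[i+1] :: cs.drop (i+2) := List.drop_eq_getElem_cons hi1
        simp only [if_pos (And.intro hc hi1), getElem!_pos cs (i+1) hi1]
        rw [hdrop, hdrop1, hc]
        rw [pvSM_false_cons, show (decide ('\\' = '\\')) = true from rfl, pvSM_true_cons]
        by_cases he : cs[i+1] = 'n' ∨ cs[i+1] = 't' ∨ cs[i+1] = 'r'
        · rw [if_pos he, if_pos he]
        · rw [if_neg he, if_neg he]
          exact ih cs (i+2) (by omega)
      · rw [if_neg hb, hdrop]
        rcases Decidable.not_and_iff_not_or_not.mp hb with hnc | hni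
        · simp only [pvSM]
          have : (decide (cs[i] = '\\')) = false := by simp [hnc]
          rw [this]
          exact ih cs (i+1) (by omega)
        · have hlen : cs.length ≤ i + 1 := by omega
          rw [List.drop_eq_nil_of_le hlen, needs_sanitize_go]
          have : ¬ (i + 1 < cs.length) := by omega
          by_cases hc : cs[i] = '\\' <;> simp [this, pvSM]
    · rw [dif_neg hi, List.drop_eq_nil_of_le (by omega)]
      simp [pvSM]

-- B's skip state just drops the next piece.
theorem alt_true_drop (l : List (List Char)) :
    needs_sanitize_alt_go true l = needs_sanitize_alt_go false (l.drop 1) := by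
  cases l <;> simp [needs_sanitize_alt_go]

-- Core correspondence: the state machine equals B's piece scan over splitOn '\\'.
theorem sm_eq_alt (cs : List Char) :
    pvSM false cs = needs_sanitize_alt_go false ((cs.splitOn '\\').drop 1) ∧
    pvSM true cs = needs_sanitize_alt_go false (cs.splitOn '\\') := by
  induction cs with
  | nil => simp [pvSM, List.splitOn, needs_sanitize_alt_go]
  | cons c r ih =>
    obtain ⟨ih1, ih2⟩ := ih
    by_cases hc : c = '\\'
    · subst hc
      have hsplit : ('\\' :: r).splitOn '\\' = [] :: r.splitOn '\\' := by
        simp [List.splitOn]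
      constructor
      · rw [hsplit]
        simpa [pvSM] using ih2
      · rw [hsplit]
        simp only [pvSM, show ¬('\\' = 'n' ∨ '\\' = 't' ∨ '\\' = 'r') by decide, if_neg,
          not_false_eq_true]
        rw [needs_sanitize_alt_go, if_neg (by simp), if_pos rfl, alt_true_drop]
        exact ih1
    · obtain ⟨h, t, hht⟩ : ∃ h t, r.splitOn '\\' = h :: t := by
        rcases e : r.splitOn '\\' with _ | ⟨h, t⟩
        · exact absurd e (by simpa [List.splitOn] using List.splitOnP_ne_nil _ r)
        · exact ⟨h, t, rfl⟩
      have hht' : List.splitOnP (fun x => x == '\\') r = h :: t := by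
        simpa [List.splitOn] using hht
      have hsplit : (c :: r).splitOn '\\' = (c :: h) :: t := by
        simp [List.splitOn, List.splitOnP_cons, hc, hht']
      constructor
      · rw [hsplit]
        simp only [List.drop_succ_cons, List.drop_zero, pvSM, hc, decide_false]
        rw [ih1, hht]
        rfl
      · rw [hsplit, needs_sanitize_alt_go, if_neg (by simp), if_neg (by simp)]
        simp only [pvSM, List.head!]
        split_ifs with he
        · rfl
        · rw [ih1, hht]
          rfl

-- ===== VERDICT (by name: the statement is the Claim_ definition above) =====
theorem needs_sanitize_spec : Claim_equal_needs_sanitize := by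
  intro content _
  unfold Spec_needs_sanitize needs_sanitize needs_sanitize_alt
  rw [go_eq_sm content.toList.length content.toList 0 (by omega)]
  simpa using (sm_eq_alt content.toList).1
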